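-- pv_equiv track=rewrite | github.com/TGITS/programming-workouts | python/kata/chessboard_puzzles/tower_on_a_chessboard/tower.py | create_and_initialize_chessboard
-- ===== SOURCE A (Python) =====
-- def create_and_initialize_chessboard(n, r, c):
--     chessboard = []
--     for i in range(1,n+1):
--         row = []
--         for j in range(1,n+1):
--             if i == r or j == c:
--                 row.append(1)
--             else:
--                 row.append(0)
--         chessboard.append(row)
--     return chessboard
-- ===== SOURCE B (Python) =====
-- def create_and_initialize_chessboard(n, r, c):
--     board = [[0] * n for _ in range(n)]
--     if 1 <= r <= n:
--         board[r - 1] = [1] * n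
--     if 1 <= c <= n:
--         for row in board:
--             row[c - 1] = 1
--     return board
-- ===== Notes on version B (the rewrite author's own statement) =====
-- stated objective: simpler
-- what changed: Replaces the per-cell if-test inside nested loops by a pre-initialized all-zero grid followed by two independent marking passes (overwrite row r-1, then set column c-1 in every row).
import Mathlib
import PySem

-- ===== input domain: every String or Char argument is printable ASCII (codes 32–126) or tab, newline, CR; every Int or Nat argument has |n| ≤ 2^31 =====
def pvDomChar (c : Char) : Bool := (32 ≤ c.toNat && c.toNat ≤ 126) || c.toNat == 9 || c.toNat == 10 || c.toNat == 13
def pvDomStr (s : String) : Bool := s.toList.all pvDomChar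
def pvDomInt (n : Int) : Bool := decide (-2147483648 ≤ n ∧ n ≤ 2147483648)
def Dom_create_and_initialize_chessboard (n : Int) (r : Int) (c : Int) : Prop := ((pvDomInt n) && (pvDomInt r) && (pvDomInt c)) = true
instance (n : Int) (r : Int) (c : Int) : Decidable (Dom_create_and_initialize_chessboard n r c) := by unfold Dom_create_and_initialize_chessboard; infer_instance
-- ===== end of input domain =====

-- B builds an all-zero n×n grid first and then marks row r-1 and column c-1 in two
-- independent guarded passes, replacing A's per-cell or-test inside nested loops (objective: simpler).

-- ===== PORT A =====
def create_and_initialize_chessboard (n : Int) (r : Int) (c : Int) : List (List Int) :=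
  (PySem.List.pyRange 1 (n + 1) 1).foldl (fun chessboard i =>
    chessboard ++ [(PySem.List.pyRange 1 (n + 1) 1).foldl (fun row j =>
      row ++ [if i = r ∨ j = c then (1 : Int) else 0]) []]) []

-- ===== PORT B =====
def create_and_initialize_chessboard_alt (n : Int) (r : Int) (c : Int) : List (List Int) :=
  let board := (PySem.List.pyRange 0 n 1).map (fun _ => List.replicate n.toNat (0 : Int))
  let board := if 1 ≤ r ∧ r ≤ n then board.set (r - 1).toNat (List.replicate n.toNat 1) else board
  let board := if 1 ≤ c ∧ c ≤ n then board.map (fun row => row.set (c - 1).toNat 1) else board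
  board

-- ===== PRECONDITION & SPEC =====
def Spec_create_and_initialize_chessboard (n : Int) (r : Int) (c : Int) (out : List (List Int)) : Prop := out = create_and_initialize_chessboard_alt n r c
instance (n : Int) (r : Int) (c : Int) (out : List (List Int)) : Decidable (Spec_create_and_initialize_chessboard n r c out) := by unfold Spec_create_and_initialize_chessboard; infer_instance

-- ===== CLAIM (what is proved, stated in full; the proofs are below) =====
def Claim_equal_create_and_initialize_chessboard : Prop := ∀ (n : Int) (r : Int) (c : Int), Dom_create_and_initialize_chessboard n r c → Spec_create_and_initialize_chessboard n r c (create_and_initialize_chessboard n r c)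

-- ===== LEMMAS AND PROOFS =====

-- the common normal form: entry (i, j) is 1 iff row i+1 equals r or column j+1 equals c
def pvBoard (n r c : Int) : List (List Int) :=
  (List.range n.toNat).map (fun i : Nat => (List.range n.toNat).map (fun j : Nat =>
    if 1 + (i : Int) = r ∨ 1 + (j : Int) = c then (1 : Int) else 0))

theorem portA_eq (n r c : Int) : create_and_initialize_chessboard n r c = pvBoard n r c := by
  simp only [create_and_initialize_chessboard, pvBoard,
    PySem.List.foldl_append_singleton_eq_map, PySem.List.pyRange_one, List.map_map,
    List.nil_append, Function.comp_def, add_sub_cancel_right]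

theorem portB_eq (n r c : Int) : create_and_initialize_chessboard_alt n r c = pvBoard n r c := by
  simp only [create_and_initialize_chessboard_alt, pvBoard]
  split_ifs with hr hc hc
  all_goals
    apply List.ext_getElem
    · simp [PySem.List.length_pyRange_one]
    · intro i h1 h2
      simp only [List.length_map, List.length_set, List.length_range,
        PySem.List.length_pyRange_one, sub_zero] at h1 h2
      apply List.ext_getElem
      · simp only [List.getElem_map, List.getElem_set, List.getElem_range]
        first
        | (split_ifs <;> simp)
        | simp
      · intro j h3 h4
        simp only [List.length_map, List.length_set, List.length_replicate,
          List.length_range, List.getElem_map, List.getElem_set, List.getElem_range,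
          List.getElem_replicate] at h3 h4 ⊢
        split_ifs <;> first | omega | (simp only [List.getElem_replicate]; omega)

-- ===== VERDICT (by name: the statement is the Claim_ definition above) =====
theorem create_and_initialize_chessboard_spec : Claim_equal_create_and_initialize_chessboard := by
  intro n r c _
  unfold Spec_create_and_initialize_chessboard
  rw [portA_eq, portB_eq]
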